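-- pv_equiv track=rewrite | github.com/AlexDavisNeuwiem/Kojun | python/kojun_v2.py | avaliar_numeros
-- ===== SOURCE A (Python) =====
-- def numero_eh_possivel(i, j, num, numeros_matriz, regioes_matriz, regioes, tamanho_matriz):
--     id_regiao = regioes_matriz[i][j]
--     regiao = regioes[id_regiao]
--
--     for (im, jm) in regiao:
--         if numeros_matriz[im][jm] == num:
--             return False
--
--     if (i-1 >= 0) and (numeros_matriz[i-1][j] == num):
--         return False
--     if (i+1 < tamanho_matriz) and (numeros_matriz[i+1][j] == num):
--         return False
--     if (j-1 >= 0) and (numeros_matriz[i][j-1] == num):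
--         return False
--     if (j+1 < tamanho_matriz) and (numeros_matriz[i][j+1] == num):
--         return False
--
--     for it in range(i - 1, -1, -1):
--         if regioes_matriz[it][j] != regioes_matriz[i][j]:
--             break
--         if numeros_matriz[it][j] < num:
--             return False
--
--     for it in range(i + 1, tamanho_matriz):
--         if regioes_matriz[it][j] != regioes_matriz[i][j]:
--             break
--         if numeros_matriz[it][j] > num:
--             return False
--
--     return True
--
-- def passar_matriz(matriz):
--     nova_matriz = []
--     for k in range(len(matriz)):
--         nova_matriz.append(matriz[k].copy())
--     return nova_matriz
--
-- def Kojun(i, j, numeros_matriz, regioes_matriz, regioes, tamanho_matriz):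
--
--     if (i == tamanho_matriz - 1 and j == tamanho_matriz):
--         return True, passar_matriz(numeros_matriz)
--     elif j == tamanho_matriz:
--         return Kojun(i+1, 0, passar_matriz(numeros_matriz), regioes_matriz, regioes, tamanho_matriz)
--     elif numeros_matriz[i][j] > 0:
--         return Kojun(i, j + 1, passar_matriz(numeros_matriz), regioes_matriz, regioes, tamanho_matriz)
--     else:
--         max_num = len(regioes[regioes_matriz[i][j]])
--         return avaliar_numeros(1, max_num, i, j, passar_matriz(numeros_matriz), regioes_matriz, regioes, tamanho_matriz)
--
-- def avaliar_numeros(num, max_num, i, j, numeros_matriz, regioes_matriz, regioes, tamanho_matriz):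
--     if (num > max_num):
--         return False, passar_matriz(numeros_matriz)
--     else:
--         if numero_eh_possivel(i, j, num, passar_matriz(numeros_matriz), regioes_matriz, regioes, tamanho_matriz):
--             numeros_matriz[i][j] = num
--             (resultado, matriz) = Kojun(i, j + 1, passar_matriz(numeros_matriz), regioes_matriz, regioes, tamanho_matriz)
--             if resultado:
--                 return resultado, passar_matriz(matriz)
--             else:
--                 numeros_matriz[i][j] = 0
--                 return avaliar_numeros(num+1, max_num, i, j, passar_matriz(numeros_matriz), regioes_matriz, regioes, tamanho_matriz)
--         else:
--             return avaliar_numeros(num+1, max_num, i, j, passar_matriz(numeros_matriz), regioes_matriz, regioes, tamanho_matriz)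
-- ===== SOURCE B (Python) =====
-- # Different decomposition: precompute the row-major list of empty cells once, then a plain
-- # recursive solver over that list with one shared grid mutated in place (assign/undo), instead of
-- # A's cell-walking Kojun/avaliar recursion that deep-copies the matrix at every call.
-- # A mutates its numeros_matriz argument in place; B does not (the return value is identical).
--
-- def _coluna(regioes_matriz, reg, b, ps):
--     seg = []
--     for p in ps:
--         if regioes_matriz[p][b] != reg:
--             break
--         seg.append(p)
--     return seg
--
-- def _livre(a, b, c, grid, regioes_matriz, regioes, tamanho_matriz):
--     reg = regioes_matriz[a][b]
--     if any(grid[p][q] == c for (p, q) in regioes[reg]):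
--         return False
--     viz = [(a - 1, b), (a + 1, b), (a, b - 1), (a, b + 1)]
--     if any(0 <= p < tamanho_matriz and 0 <= q < tamanho_matriz and grid[p][q] == c
--            for (p, q) in viz):
--         return False
--     cima = _coluna(regioes_matriz, reg, b, range(a - 1, -1, -1))
--     baixo = _coluna(regioes_matriz, reg, b, range(a + 1, tamanho_matriz))
--     return all(grid[p][b] >= c for p in cima) and all(grid[p][b] <= c for p in baixo)
--
-- def _resolver(cells, grid, regioes_matriz, regioes, tamanho_matriz):
--     if not cells:
--         return True
--     (a, b) = cells[0]
--     velho = grid[a][b]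
--     for c in range(1, len(regioes[regioes_matriz[a][b]]) + 1):
--         if _livre(a, b, c, grid, regioes_matriz, regioes, tamanho_matriz):
--             grid[a][b] = c
--             if _resolver(cells[1:], grid, regioes_matriz, regioes, tamanho_matriz):
--                 return True
--             grid[a][b] = 0
--     grid[a][b] = velho
--     return False
--
-- def avaliar_numeros(num, max_num, i, j, numeros_matriz, regioes_matriz, regioes, tamanho_matriz):
--     if num > max_num:
--         return False, [row[:] for row in numeros_matriz]
--     grid = [row[:] for row in numeros_matriz]
--     t = tamanho_matriz
--     resto = [(i, b) for b in range(j + 1, t) if grid[i][b] <= 0]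
--     for a in range(i + 1, t):
--         resto += [(a, b) for b in range(t) if grid[a][b] <= 0]
--     for c in range(num, max_num + 1):
--         if _livre(i, j, c, grid, regioes_matriz, regioes, tamanho_matriz):
--             grid[i][j] = c
--             if _resolver(resto, grid, regioes_matriz, regioes, tamanho_matriz):
--                 return True, [row[:] for row in grid]
--             grid[i][j] = 0
--     return False, grid
-- ===== Notes on version B (the rewrite author's own statement) =====
-- stated objective: alternative
-- what changed: Same backtracking search, different decomposition: B precomputes the row-major list of empty cells once and runs a plain recursive solver over that list with a single shared grid mutated in place (assign/undo, saved value restored on level exit), instead of A's cell-walking Kojun/avaliar mutual recursion that deep-copies the whole matrix at every call; B does not mutate its argument.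
-- outside the precondition, e.g. on avaliar_numeros(1, 1, -1, 0, [[0]], [[0]], [[(0, 0)]], 1): A returns (True, [[1]]), B returns (False, [[0]]); on avaliar_numeros(1, 1, 0, 0, [[0]], [[0]], [[(0, 0)]], 2): A raises IndexError, B raises IndexError
import Mathlib
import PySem

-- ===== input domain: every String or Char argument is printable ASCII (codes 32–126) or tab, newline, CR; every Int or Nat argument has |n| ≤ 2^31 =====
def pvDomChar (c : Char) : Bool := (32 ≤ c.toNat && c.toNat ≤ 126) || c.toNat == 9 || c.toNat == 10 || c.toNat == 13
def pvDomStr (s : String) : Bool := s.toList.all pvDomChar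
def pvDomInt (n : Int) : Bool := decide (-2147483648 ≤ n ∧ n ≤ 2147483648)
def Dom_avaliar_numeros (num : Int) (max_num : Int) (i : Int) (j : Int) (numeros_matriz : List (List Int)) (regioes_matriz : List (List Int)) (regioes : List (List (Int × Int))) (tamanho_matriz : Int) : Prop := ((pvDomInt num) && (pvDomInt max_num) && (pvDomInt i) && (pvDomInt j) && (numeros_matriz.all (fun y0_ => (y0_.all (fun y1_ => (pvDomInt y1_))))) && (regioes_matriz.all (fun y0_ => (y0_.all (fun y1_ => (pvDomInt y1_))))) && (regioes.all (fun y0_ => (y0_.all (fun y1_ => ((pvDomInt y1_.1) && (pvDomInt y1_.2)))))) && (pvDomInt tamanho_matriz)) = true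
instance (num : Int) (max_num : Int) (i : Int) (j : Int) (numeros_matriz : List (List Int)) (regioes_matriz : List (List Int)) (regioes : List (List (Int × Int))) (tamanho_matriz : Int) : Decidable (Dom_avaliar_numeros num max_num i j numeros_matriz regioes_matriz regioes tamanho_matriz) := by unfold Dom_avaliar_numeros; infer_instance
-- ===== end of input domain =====

-- B recomposes A's backtracking search: the row-major list of empty cells is computed once, then a
-- fuel-free recursive solver walks that list with one shared working grid (assign / undo in place),
-- instead of A's cell-walking Kojun/avaliar mutual recursion that deep-copies the matrix at every
-- call.  Same return value; A also mutates its numeros_matriz argument in place, B does not — the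
-- equivalence proved here is about the return value only.  A's port totalises the walk with the
-- fuel counter pvFuel; B's port needs no fuel (structural recursion on the cell list).

-- shared indexing/assignment helpers (PySem compositions; m[i][j] read and write)
def pvCell (m : List (List Int)) (i j : Int) : Int :=
  PySem.List.pyGetD (PySem.List.pyGetD m i []) j 0
def pvSet (m : List (List Int)) (i j v : Int) : List (List Int) :=
  PySem.List.pySetD m i (PySem.List.pySetD (PySem.List.pyGetD m i []) j v)
def pvFuel (t : Int) : Nat := 2 * (t.toNat + 2) * (t.toNat + 2) + 8

-- ===== PORT A =====
def passar_matriz (m : List (List Int)) : List (List Int) :=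
  (PySem.List.pyRange 0 (PySem.List.len m) 1).foldl
    (fun acc k => acc ++ [PySem.List.pyGetD m k []]) []

-- A's two for-range loops with break/return False (true = some `return False` fired)
def scan_sobe (nm rm : List (List Int)) (j id num : Int) : List Int → Bool
  | [] => false
  | it :: rest =>
    if pvCell rm it j ≠ id then false
    else if pvCell nm it j < num then true
    else scan_sobe nm rm j id num rest

def scan_desce (nm rm : List (List Int)) (j id num : Int) : List Int → Bool
  | [] => false
  | it :: rest =>
    if pvCell rm it j ≠ id then false
    else if pvCell nm it j > num then true
    else scan_desce nm rm j id num rest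

def numero_eh_possivel (i j num : Int) (nm rm : List (List Int)) (rg : List (List (Int × Int))) (t : Int) : Bool :=
  let id := pvCell rm i j
  let regiao := PySem.List.pyGetD rg id []
  if regiao.any (fun p => pvCell nm p.1 p.2 == num) then false
  else if decide (i - 1 ≥ 0) && (pvCell nm (i - 1) j == num) then false
  else if decide (i + 1 < t) && (pvCell nm (i + 1) j == num) then false
  else if decide (j - 1 ≥ 0) && (pvCell nm i (j - 1) == num) then false
  else if decide (j + 1 < t) && (pvCell nm i (j + 1) == num) then false
  else if scan_sobe nm rm j id num (PySem.List.pyRange (i - 1) (-1) (-1)) then false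
  else if scan_desce nm rm j id num (PySem.List.pyRange (i + 1) t 1) then false
  else true

-- A's avaliar_numeros recursion on num, with `kojun` the recursive Kojun passed as a continuation;
-- the Nat counter k = (max_num + 1 - num).toNat counts the remaining candidates: k = 0 exactly when
-- num > max_num, A's base case.
def avalGo (kojun : Int → Int → List (List Int) → Bool × List (List Int))
    (rm : List (List Int)) (rg : List (List (Int × Int))) (t : Int) :
    Nat → Int → Int → Int → List (List Int) → Bool × List (List Int)
  | 0, _, _, _, nm => (false, passar_matriz nm)
  | k + 1, num, i, j, nm =>
    if numero_eh_possivel i j num (passar_matriz nm) rm rg t then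
      let nm1 := pvSet nm i j num
      let r := kojun i (j + 1) (passar_matriz nm1)
      if r.1 then (r.1, passar_matriz r.2)
      else avalGo kojun rm rg t k (num + 1) i j (passar_matriz (pvSet nm1 i j 0))
    else avalGo kojun rm rg t k (num + 1) i j (passar_matriz nm)

def KojunA (fuel : Nat) (i j : Int) (nm rm : List (List Int)) (rg : List (List (Int × Int))) (t : Int) : Bool × List (List Int) :=
  match fuel with
  | 0 => (false, nm)
  | f + 1 =>
    if i == t - 1 && j == t then (true, passar_matriz nm)
    else if j == t then KojunA f (i + 1) 0 (passar_matriz nm) rm rg t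
    else if pvCell nm i j > 0 then KojunA f i (j + 1) (passar_matriz nm) rm rg t
    else
      let max_num := PySem.List.len (PySem.List.pyGetD rg (pvCell rm i j) [])
      avalGo (fun i j nm => KojunA f i j nm rm rg t) rm rg t (max_num + 1 - 1).toNat 1 i j (passar_matriz nm)

def avaliar_numeros (num : Int) (max_num : Int) (i : Int) (j : Int) (numeros_matriz : List (List Int)) (regioes_matriz : List (List Int)) (regioes : List (List (Int × Int))) (tamanho_matriz : Int) : Bool × List (List Int) :=
  avalGo (fun i j nm => KojunA (pvFuel tamanho_matriz) i j nm regioes_matriz regioes tamanho_matriz)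
    regioes_matriz regioes tamanho_matriz
    (max_num + 1 - num).toNat num i j numeros_matriz

-- ===== PORT B =====
def copia (m : List (List Int)) : List (List Int) := m.map (fun row => row)

-- Source B's _coluna: collect the same-region prefix of a column index list (loop with break)
def colSeg (rm : List (List Int)) (reg b : Int) : List Int → List Int
  | [] => []
  | p :: ps => if pvCell rm p b ≠ reg then [] else p :: colSeg rm reg b ps

def livre (a b c : Int) (grid rm : List (List Int)) (rg : List (List (Int × Int))) (t : Int) : Bool :=
  let reg := pvCell rm a b
  if (PySem.List.pyGetD rg reg []).any (fun p => pvCell grid p.1 p.2 == c) then false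
  else if [(a - 1, b), (a + 1, b), (a, b - 1), (a, b + 1)].any
      (fun p => decide (0 ≤ p.1) && decide (p.1 < t) && decide (0 ≤ p.2) && decide (p.2 < t)
                && (pvCell grid p.1 p.2 == c)) then false
  else
    (colSeg rm reg b (PySem.List.pyRange (a - 1) (-1) (-1))).all
        (fun p => decide (pvCell grid p b ≥ c))
    && (colSeg rm reg b (PySem.List.pyRange (a + 1) t 1)).all
        (fun p => decide (pvCell grid p b ≤ c))

-- Source B's candidate loop inside _resolver; `rec` is the recursive call on the remaining cells,
-- `velho` the saved original cell value restored when the loop exhausts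
def tenta (rm : List (List Int)) (rg : List (List (Int × Int))) (t a b velho : Int)
    (rec : List (List Int) → Bool × List (List Int)) :
    List Int → List (List Int) → Bool × List (List Int)
  | [], grid => (false, pvSet grid a b velho)
  | c :: cs, grid =>
    if livre a b c grid rm rg t then
      let r := rec (pvSet grid a b c)
      if r.1 then (true, r.2)
      else tenta rm rg t a b velho rec cs (pvSet r.2 a b 0)
    else tenta rm rg t a b velho rec cs grid

-- Source B's _resolver: structural recursion on the precomputed list of empty cells
def resolver (rm : List (List Int)) (rg : List (List (Int × Int))) (t : Int) :
    List (Int × Int) → List (List Int) → Bool × List (List Int)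
  | [], grid => (true, grid)
  | (a, b) :: rest, grid =>
    tenta rm rg t a b (pvCell grid a b) (fun g => resolver rm rg t rest g)
      (PySem.List.pyRange 1 (PySem.List.len (PySem.List.pyGetD rg (pvCell rm a b) []) + 1) 1) grid

-- Source B's top-level candidate loop (no save/restore: the cell stays 0 on failure,
-- and the solved grid is copied on success)
def tentaTop (rm : List (List Int)) (rg : List (List (Int × Int))) (t i j : Int)
    (resto : List (Int × Int)) : List Int → List (List Int) → Bool × List (List Int)
  | [], grid => (false, grid)
  | c :: cs, grid =>
    if livre i j c grid rm rg t then
      let r := resolver rm rg t resto (pvSet grid i j c)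
      if r.1 then (true, copia r.2)
      else tentaTop rm rg t i j resto cs (pvSet r.2 i j 0)
    else tentaTop rm rg t i j resto cs grid

-- Source B's `resto`: the empty cells after (a, b-1) in row-major order (rest of row a, then full rows)
def emptiesFrom (grid : List (List Int)) (t a b : Int) : List (Int × Int) :=
  ((PySem.List.pyRange b t 1).filter (fun q => decide (pvCell grid a q ≤ 0))).map (fun q => (a, q))
  ++ (PySem.List.pyRange (a + 1) t 1).flatMap
      (fun p => ((PySem.List.pyRange 0 t 1).filter (fun q => decide (pvCell grid p q ≤ 0))).map
        (fun q => (p, q)))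

def avaliar_numeros_alt (num : Int) (max_num : Int) (i : Int) (j : Int) (numeros_matriz : List (List Int)) (regioes_matriz : List (List Int)) (regioes : List (List (Int × Int))) (tamanho_matriz : Int) : Bool × List (List Int) :=
  if num > max_num then (false, copia numeros_matriz)
  else
    let grid := copia numeros_matriz
    let resto := emptiesFrom grid tamanho_matriz i (j + 1)
    tentaTop regioes_matriz regioes tamanho_matriz i j resto
      (PySem.List.pyRange num (max_num + 1) 1) grid

-- ===== PRECONDITION & SPEC =====
-- Pre_ excludes (unless the num > max_num short-circuit answers immediately) inputs whose matrix
-- shapes are inconsistent with tamanho_matriz or whose indices/region coordinates/region ids fall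
-- outside the board, on which Python raises IndexError or silently reads cells via negative-index
-- wraparound, an artefact of A's implementation.
def Pre_avaliar_numeros (num : Int) (max_num : Int) (i : Int) (j : Int) (numeros_matriz : List (List Int)) (regioes_matriz : List (List Int)) (regioes : List (List (Int × Int))) (tamanho_matriz : Int) : Prop :=
  num > max_num ∨
  (1 ≤ tamanho_matriz ∧
   numeros_matriz.length = tamanho_matriz.toNat ∧ (∀ r ∈ numeros_matriz, r.length = tamanho_matriz.toNat) ∧
   regioes_matriz.length = tamanho_matriz.toNat ∧ (∀ r ∈ regioes_matriz, r.length = tamanho_matriz.toNat) ∧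
   0 ≤ i ∧ i < tamanho_matriz ∧ 0 ≤ j ∧ j < tamanho_matriz ∧
   (∀ r ∈ regioes_matriz, ∀ x ∈ r, 0 ≤ x ∧ x < (regioes.length : Int)) ∧
   (∀ reg ∈ regioes, ∀ p ∈ reg, 0 ≤ p.1 ∧ p.1 < tamanho_matriz ∧ 0 ≤ p.2 ∧ p.2 < tamanho_matriz))
instance (num : Int) (max_num : Int) (i : Int) (j : Int) (numeros_matriz : List (List Int)) (regioes_matriz : List (List Int)) (regioes : List (List (Int × Int))) (tamanho_matriz : Int) : Decidable (Pre_avaliar_numeros num max_num i j numeros_matriz regioes_matriz regioes tamanho_matriz) := by unfold Pre_avaliar_numeros; infer_instance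

def pvWitness_avaliar_numeros : Int × Int × Int × Int × List (List Int) × List (List Int) × (List (List (Int × Int))) × Int :=
  (1, 1, 0, 0, [[0]], [[0]], [[(0, 0)]], 1)

def Spec_avaliar_numeros (num : Int) (max_num : Int) (i : Int) (j : Int) (numeros_matriz : List (List Int)) (regioes_matriz : List (List Int)) (regioes : List (List (Int × Int))) (tamanho_matriz : Int) (out : Bool × List (List Int)) : Prop := out = avaliar_numeros_alt num max_num i j numeros_matriz regioes_matriz regioes tamanho_matriz
instance (num : Int) (max_num : Int) (i : Int) (j : Int) (numeros_matriz : List (List Int)) (regioes_matriz : List (List Int)) (regioes : List (List (Int × Int))) (tamanho_matriz : Int) (out : Bool × List (List Int)) : Decidable (Spec_avaliar_numeros num max_num i j numeros_matriz regioes_matriz regioes tamanho_matriz out) := by unfold Spec_avaliar_numeros; infer_instance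

-- ===== CLAIM (what is proved, stated in full; the proofs are below) =====
def Claim_equal_avaliar_numeros : Prop := ∀ (num : Int) (max_num : Int) (i : Int) (j : Int) (numeros_matriz : List (List Int)) (regioes_matriz : List (List Int)) (regioes : List (List (Int × Int))) (tamanho_matriz : Int), Dom_avaliar_numeros num max_num i j numeros_matriz regioes_matriz regioes tamanho_matriz → Pre_avaliar_numeros num max_num i j numeros_matriz regioes_matriz regioes tamanho_matriz → Spec_avaliar_numeros num max_num i j numeros_matriz regioes_matriz regioes tamanho_matriz (avaliar_numeros num max_num i j numeros_matriz regioes_matriz regioes tamanho_matriz)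

-- ===== LEMMAS AND PROOFS =====

theorem passar_eq (m : List (List Int)) : passar_matriz m = m := by
  unfold passar_matriz
  rw [PySem.List.foldl_pyRange_zero_pyGetD m [] (fun acc r => acc ++ [r]) []]
  simpa using PySem.List.foldl_append_singleton m []

theorem copia_eq (m : List (List Int)) : copia m = m := by
  simp [copia]

-- writing one cell does not change any other cell (nonnegative indices; Python index semantics)
theorem cell_set_ne (g : List (List Int)) (a b x p q : Int)
    (ha : 0 ≤ a) (hb : 0 ≤ b) (hp : 0 ≤ p) (hq : 0 ≤ q) (hne : p ≠ a ∨ q ≠ b) :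
    pvCell (pvSet g a b x) p q = pvCell g p q := by
  unfold pvCell pvSet
  rw [PySem.List.pySetD_of_nonneg _ _ ha, PySem.List.pySetD_of_nonneg _ _ hb,
    PySem.List.pyGetD_of_nonneg _ _ ha, PySem.List.pyGetD_of_nonneg _ _ hp,
    PySem.List.pyGetD_of_nonneg _ _ hp]
  by_cases hpa : p = a
  · subst hpa
    have hqb : q ≠ b := by tauto
    have hqb' : q.toNat ≠ b.toNat := by omega
    rcases Nat.lt_or_ge p.toNat g.length with hlen | hlen
    · rw [List.getD, List.getElem?_set_self hlen]
      simp only [Option.getD_some]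
      rw [PySem.List.pyGetD_of_nonneg _ _ hq, PySem.List.pyGetD_of_nonneg _ _ hq,
        List.getD, List.getElem?_set_ne (Ne.symm hqb'), ← List.getD]
    · rw [List.set_eq_of_length_le hlen]
  · have : p.toNat ≠ a.toNat := by omega
    rw [List.getD, List.getElem?_set_ne (Ne.symm this), ← List.getD]

-- writing back the value a cell already holds is a no-op
theorem set_self (g : List (List Int)) (a b : Int) (ha : 0 ≤ a) (hb : 0 ≤ b) :
    pvSet g a b (pvCell g a b) = g := by
  unfold pvCell pvSet
  rw [PySem.List.pySetD_of_nonneg _ _ ha, PySem.List.pySetD_of_nonneg _ _ hb,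
    PySem.List.pyGetD_of_nonneg _ _ ha, PySem.List.pyGetD_of_nonneg _ _ hb]
  have hrow : ∀ r : List Int, r.set b.toNat (r.getD b.toNat 0) = r := by
    intro r
    rcases Nat.lt_or_ge b.toNat r.length with h | h
    · rw [List.getD, List.getElem?_eq_getElem h]; simp
    · exact List.set_eq_of_length_le h
  rw [hrow]
  rcases Nat.lt_or_ge a.toNat g.length with h | h
  · rw [List.getD, List.getElem?_eq_getElem h]; simp
  · exact List.set_eq_of_length_le h

-- two writes to the same cell collapse to the second
theorem set_set (g : List (List Int)) (a b x y : Int) (ha : 0 ≤ a) (hb : 0 ≤ b) :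
    pvSet (pvSet g a b x) a b y = pvSet g a b y := by
  unfold pvSet
  rw [PySem.List.pySetD_of_nonneg _ _ ha, PySem.List.pySetD_of_nonneg _ _ ha,
    PySem.List.pySetD_of_nonneg _ _ ha, PySem.List.pySetD_of_nonneg _ _ hb,
    PySem.List.pySetD_of_nonneg _ _ hb, PySem.List.pySetD_of_nonneg _ _ hb,
    PySem.List.pyGetD_of_nonneg _ _ ha, PySem.List.pyGetD_of_nonneg _ _ ha]
  rcases Nat.lt_or_ge a.toNat g.length with h | h
  · have hmid : ∀ r : List Int, (g.set a.toNat r).getD a.toNat [] = r := by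
      intro r
      rw [List.getD_eq_getElem?_getD, List.getElem?_set_self h, Option.getD_some]
    rw [hmid, List.set_set, List.set_set]
  · rw [List.set_eq_of_length_le h, List.set_eq_of_length_le h]

theorem sobe_seg (nm rm : List (List Int)) (j id num : Int) : ∀ l : List Int,
    scan_sobe nm rm j id num l = !((colSeg rm id j l).all (fun p => decide (pvCell nm p j ≥ num))) := by
  intro l
  induction l with
  | nil => rfl
  | cons p ps IH =>
    simp only [scan_sobe, colSeg]
    by_cases hid : pvCell rm p j = id
    · by_cases hlt : pvCell nm p j < num
      · simp [hid, hlt, show ¬(pvCell nm p j ≥ num) by omega]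
      · simp [hid, hlt, show pvCell nm p j ≥ num by omega, IH]
    · simp [hid]

theorem desce_seg (nm rm : List (List Int)) (j id num : Int) : ∀ l : List Int,
    scan_desce nm rm j id num l = !((colSeg rm id j l).all (fun p => decide (pvCell nm p j ≤ num))) := by
  intro l
  induction l with
  | nil => rfl
  | cons p ps IH =>
    simp only [scan_desce, colSeg]
    by_cases hid : pvCell rm p j = id
    · by_cases hlt : pvCell nm p j > num
      · simp [hid, hlt, show ¬(pvCell nm p j ≤ num) by omega]
      · simp [hid, hlt, show pvCell nm p j ≤ num by omega, IH]
    · simp [hid]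

-- the if-chain of A's checks equals B's or-chain / all-pair form
theorem bool_chain : ∀ r c1 c2 c3 c4 s1 s2 : Bool,
    (if r then false else if c1 then false else if c2 then false else if c3 then false
     else if c4 then false else if s1 then false else if s2 then false else true)
    = (if r then false else if c1 || c2 || c3 || c4 then false else (!s1 && !s2)) := by decide

theorem poss_eq (a b c : Int) (g rm : List (List Int)) (rg : List (List (Int × Int))) (t : Int)
    (ha0 : 0 ≤ a) (hat : a < t) (hb0 : 0 ≤ b) (hbt : b < t) :
    numero_eh_possivel a b c g rm rg t = livre a b c g rm rg t := by
  simp only [numero_eh_possivel, livre, List.any_cons, List.any_nil, Bool.or_false,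
    sobe_seg, desce_seg, ge_iff_le]
  have e1 : decide (a - 1 < t) = true := by simp; omega
  have e2 : decide (0 ≤ a + 1) = true := by simp; omega
  have e3 : decide (0 ≤ b) = true := by simp; omega
  have e4 : decide (b < t) = true := by simp; omega
  have e5 : decide (0 ≤ a) = true := by simp; omega
  have e6 : decide (a < t) = true := by simp; omega
  have e7 : decide (b - 1 < t) = true := by simp; omega
  have e8 : decide (0 ≤ b + 1) = true := by simp; omega
  simp only [e1, e2, e3, e4, e5, e6, e7, e8, Bool.true_and, Bool.and_true]
  rw [bool_chain]
  simp [Bool.not_not, Bool.and_assoc]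

-- ===== emptiesFrom step lemmas =====
theorem empties_row_end (g : List (List Int)) (t a : Int) (h : a + 1 < t) :
    emptiesFrom g t a t = emptiesFrom g t (a + 1) 0 := by
  unfold emptiesFrom
  rw [PySem.List.pyRange_one_eq_nil (le_refl t), PySem.List.pyRange_one_cons h,
    List.flatMap_cons]
  simp

theorem empties_filled (g : List (List Int)) (t a b : Int) (hb : b < t)
    (h : ¬ pvCell g a b ≤ 0) : emptiesFrom g t a b = emptiesFrom g t a (b + 1) := by
  unfold emptiesFrom
  rw [PySem.List.pyRange_one_cons hb]
  simp [h]

theorem empties_empty (g : List (List Int)) (t a b : Int) (hb : b < t)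
    (h : pvCell g a b ≤ 0) : emptiesFrom g t a b = (a, b) :: emptiesFrom g t a (b + 1) := by
  unfold emptiesFrom
  rw [PySem.List.pyRange_one_cons hb]
  simp [h]

-- a write at (a, b) does not change the empty cells strictly after (a, b)
theorem empties_set (g : List (List Int)) (t a b x : Int) (ha : 0 ≤ a) (hb : 0 ≤ b) :
    emptiesFrom (pvSet g a b x) t a (b + 1) = emptiesFrom g t a (b + 1) := by
  unfold emptiesFrom
  congr 1
  · congr 1
    apply List.filter_congr
    intro q hq
    rcases (PySem.List.mem_pyRange_one).1 hq with ⟨h1, h2⟩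
    rw [cell_set_ne g a b x a q ha hb ha (by omega) (Or.inr (by omega))]
  · apply List.flatMap_congr
    intro p hp
    rcases (PySem.List.mem_pyRange_one).1 hp with ⟨h1, h2⟩
    congr 1
    apply List.filter_congr
    intro q hq
    rcases (PySem.List.mem_pyRange_one).1 hq with ⟨h3, h4⟩
    rw [cell_set_ne g a b x p q ha hb (by omega) (by omega) (Or.inl (by omega))]

-- ===== the candidate-loop correspondences =====

-- the three-part relation the fuel induction carries: equal success bits, equal results on
-- success, and (B only) the failed solver hands back exactly the grid it was given
def pvRel (K R : Bool × List (List Int)) (g : List (List Int)) : Prop :=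
  K.1 = R.1 ∧ (R.1 = true → K = R) ∧ (R.1 = false → R.2 = g)

theorem loop_inner (rm : List (List Int)) (rg : List (List (Int × Int))) (t a b velho maxn : Int)
    (rest : List (Int × Int))
    (kojun : Int → Int → List (List Int) → Bool × List (List Int))
    (Hk : ∀ g'', emptiesFrom g'' t a (b + 1) = rest →
      pvRel (kojun a (b + 1) g'') (resolver rm rg t rest g'') g'')
    (ha0 : 0 ≤ a) (hat : a < t) (hb0 : 0 ≤ b) (hbt : b < t) :
    ∀ (k : Nat) (num : Int) (g' g₀ : List (List Int)),
      (maxn + 1 - num).toNat = k →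
      pvSet g' a b velho = g₀ →
      emptiesFrom g' t a (b + 1) = rest →
      pvRel (avalGo kojun rm rg t k num a b g')
        (tenta rm rg t a b velho (fun g => resolver rm rg t rest g)
          (PySem.List.pyRange num (maxn + 1) 1) g') g₀ := by
  intro k
  induction k with
  | zero =>
    intro num g' g₀ hk hset hF
    rw [PySem.List.pyRange_one_eq_nil (by omega)]
    simp only [avalGo, tenta, passar_eq]
    exact ⟨rfl, by simp, fun _ => hset⟩
  | succ k IH =>
    intro num g' g₀ hk hset hF
    rw [PySem.List.pyRange_one_cons (by omega)]
    simp only [avalGo, tenta, passar_eq]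
    rw [poss_eq a b num g' rm rg t ha0 hat hb0 hbt]
    by_cases hp : livre a b num g' rm rg t
    · simp only [hp, if_true]
      have hF1 : emptiesFrom (pvSet g' a b num) t a (b + 1) = rest := by
        rw [empties_set g' t a b num ha0 hb0, hF]
      have hrel := Hk (pvSet g' a b num) hF1
      rcases Bool.eq_false_or_eq_true (resolver rm rg t rest (pvSet g' a b num)).1 with hb1 | hb1
      swap
      · have hA1 : (kojun a (b + 1) (pvSet g' a b num)).1 = false := by rw [hrel.1, hb1]
        have hres : (resolver rm rg t rest (pvSet g' a b num)).2 = pvSet g' a b num :=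
          hrel.2.2 hb1
        simp only [hA1, hb1, Bool.false_eq_true, if_false, hres]
        exact IH (num + 1) (pvSet (pvSet g' a b num) a b 0) g₀ (by omega)
          (by rw [set_set _ _ _ _ _ ha0 hb0, set_set _ _ _ _ _ ha0 hb0]; exact hset)
          (by rw [empties_set _ _ _ _ _ ha0 hb0, empties_set _ _ _ _ _ ha0 hb0]; exact hF)
      · have hA1 : (kojun a (b + 1) (pvSet g' a b num)).1 = true := by rw [hrel.1, hb1]
        have hAB := hrel.2.1 hb1
        simp only [hb1, if_true, hAB]
        exact ⟨rfl, fun _ => rfl, by simp⟩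
    · simp only [hp, Bool.false_eq_true, if_false]
      exact IH (num + 1) g' g₀ (by omega) hset hF

theorem loop_top (rm : List (List Int)) (rg : List (List (Int × Int))) (t i j : Int)
    (resto : List (Int × Int))
    (kojun : Int → Int → List (List Int) → Bool × List (List Int))
    (Hk : ∀ g'', emptiesFrom g'' t i (j + 1) = resto →
      pvRel (kojun i (j + 1) g'') (resolver rm rg t resto g'') g'')
    (hi0 : 0 ≤ i) (hit : i < t) (hj0 : 0 ≤ j) (hjt : j < t) (maxn : Int) :
    ∀ (k : Nat) (num : Int) (g' : List (List Int)),
      (maxn + 1 - num).toNat = k →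
      emptiesFrom g' t i (j + 1) = resto →
      avalGo kojun rm rg t k num i j g'
        = tentaTop rm rg t i j resto (PySem.List.pyRange num (maxn + 1) 1) g' := by
  intro k
  induction k with
  | zero =>
    intro num g' hk hF
    rw [PySem.List.pyRange_one_eq_nil (by omega)]
    simp only [avalGo, tentaTop, passar_eq]
  | succ k IH =>
    intro num g' hk hF
    rw [PySem.List.pyRange_one_cons (by omega)]
    simp only [avalGo, tentaTop, passar_eq]
    rw [poss_eq i j num g' rm rg t hi0 hit hj0 hjt]
    by_cases hp : livre i j num g' rm rg t
    · simp only [hp, if_true]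
      have hF1 : emptiesFrom (pvSet g' i j num) t i (j + 1) = resto := by
        rw [empties_set g' t i j num hi0 hj0, hF]
      have hrel := Hk (pvSet g' i j num) hF1
      rcases Bool.eq_false_or_eq_true (resolver rm rg t resto (pvSet g' i j num)).1 with hb1 | hb1
      · have hA1 : (kojun i (j + 1) (pvSet g' i j num)).1 = true := by rw [hrel.1, hb1]
        have hAB := hrel.2.1 hb1
        simp only [hb1, if_true, hAB, copia_eq]
      · have hA1 : (kojun i (j + 1) (pvSet g' i j num)).1 = false := by rw [hrel.1, hb1]
        have hres : (resolver rm rg t resto (pvSet g' i j num)).2 = pvSet g' i j num :=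
          hrel.2.2 hb1
        simp only [hA1, hb1, Bool.false_eq_true, if_false, hres]
        exact IH (num + 1) (pvSet (pvSet g' i j num) i j 0) (by omega)
          (by rw [empties_set _ _ _ _ _ hi0 hj0, empties_set _ _ _ _ _ hi0 hj0]; exact hF)
    · simp only [hp, Bool.false_eq_true, if_false]
      exact IH (num + 1) g' (by omega) hF

theorem walk (rm : List (List Int)) (rg : List (List (Int × Int))) (t : Int) :
    ∀ (f : Nat) (a b : Int) (g : List (List Int)),
      0 ≤ a → a < t → 0 ≤ b → b ≤ t →
      ((t - a) * (t + 1) - b).toNat ≤ f →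
      pvRel (KojunA f a b g rm rg t) (resolver rm rg t (emptiesFrom g t a b) g) g := by
  intro f
  induction f with
  | zero =>
    intro a b g ha0 hat hb0 hbt hfuel
    exfalso
    have h1 : 0 ≤ (t - a - 1) * (t + 1) := mul_nonneg (by omega) (by omega)
    have h2 : (t - a) * (t + 1) = (t + 1) + (t - a - 1) * (t + 1) := by ring
    omega
  | succ f IH =>
    intro a b g ha0 hat hb0 hbt hfuel
    have h1 : 0 ≤ (t - a - 1) * (t + 1) := mul_nonneg (by omega) (by omega)
    have h2 : (t - a) * (t + 1) = (t + 1) + (t - a - 1) * (t + 1) := by ring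
    rw [KojunA]
    by_cases hbt' : b = t
    · subst b
      by_cases hata : a = t - 1
      · subst a
        have hE : emptiesFrom g t (t - 1) t = [] := by
          unfold emptiesFrom
          rw [PySem.List.pyRange_one_eq_nil (le_refl t),
            PySem.List.pyRange_one_eq_nil (by omega : t ≤ t - 1 + 1)]
          simp
        rw [hE]
        simp only [BEq.rfl, Bool.and_self, if_true, passar_eq, resolver]
        exact ⟨rfl, fun _ => rfl, by simp⟩
      · have hc1 : (a == t - 1) = false := by simp [hata]
        have hc2 : (t == t) = true := by simp
        have ha1t : a + 1 < t := by omega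
        simp only [hc1, hc2, Bool.false_and, Bool.false_eq_true, if_false, if_true]
        rw [passar_eq]
        rw [empties_row_end g t a ha1t]
        exact IH (a + 1) 0 g (by omega) (by omega) (by omega) (by omega)
          (by have h3 : (t - (a + 1)) * (t + 1) = (t - a) * (t + 1) - (t + 1) := by ring
              omega)
    · have hblt : b < t := by omega
      have hc2 : (b == t) = false := by simp [hbt']
      simp only [hc2, Bool.and_false, Bool.false_eq_true, if_false, passar_eq]
      by_cases hcell : pvCell g a b > 0
      · simp only [hcell, if_true]
        rw [empties_filled g t a b hblt (by omega)]
        exact IH a (b + 1) g ha0 hat (by omega) (by omega) (by omega)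
      · simp only [hcell, if_false]
        rw [empties_empty g t a b hblt (by omega)]
        simp only [resolver]
        exact loop_inner rm rg t a b (pvCell g a b)
          (PySem.List.len (PySem.List.pyGetD rg (pvCell rm a b) []))
          (emptiesFrom g t a (b + 1)) (fun i j nm => KojunA f i j nm rm rg t)
          (fun g'' hF'' => by
            have := IH a (b + 1) g'' ha0 hat (by omega) (by omega) (by omega)
            rwa [hF''] at this)
          ha0 hat hb0 hblt _ 1 g g rfl (set_self g a b ha0 hb0) rfl

-- ===== VERDICT (by name: the statement is the Claim_ definition above) =====
theorem fuel_enough (t i j : Int) (ht : 1 ≤ t) (hi0 : 0 ≤ i) (hj0 : 0 ≤ j) :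
    ((t - i) * (t + 1) - (j + 1)).toNat ≤ pvFuel t := by
  have e1 : (t - i) * (t + 1) ≤ t * (t + 1) :=
    mul_le_mul_of_nonneg_right (by omega) (by omega)
  have e2 : ((t - i) * (t + 1) - (j + 1)).toNat ≤ (t * (t + 1)).toNat := by
    apply Int.toNat_le_toNat; omega
  have htT : ((t.toNat : Int)) = t := Int.toNat_of_nonneg (by omega)
  have e3 : t * (t + 1) = ((t.toNat * (t.toNat + 1) : Nat) : Int) := by
    push_cast [htT]; ring
  have e4 : (t * (t + 1)).toNat = t.toNat * (t.toNat + 1) := by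
    rw [e3, Int.toNat_natCast]
  have e5 : t.toNat * (t.toNat + 1) ≤ (t.toNat + 2) * (t.toNat + 2) :=
    Nat.mul_le_mul (by omega) (by omega)
  have e6 : 2 * (t.toNat + 2) * (t.toNat + 2) = (t.toNat + 2) * (t.toNat + 2) + (t.toNat + 2) * (t.toNat + 2) := by ring
  unfold pvFuel
  omega

theorem avaliar_numeros_spec : Claim_equal_avaliar_numeros := by
  intro num max_num i j nm rm rg t _ hpre
  unfold Spec_avaliar_numeros avaliar_numeros avaliar_numeros_alt
  by_cases hnm : num > max_num
  · have hk : (max_num + 1 - num).toNat = 0 := by omega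
    rw [hk, if_pos hnm]
    simp only [avalGo, passar_eq, copia_eq]
  · rcases hpre with h | hsh
    · omega
    obtain ⟨ht, _, _, _, _, hi0, hit, hj0, hjt, _, _⟩ := hsh
    rw [if_neg hnm]
    simp only [copia_eq]
    exact loop_top rm rg t i j (emptiesFrom nm t i (j + 1))
      (fun i j nm => KojunA (pvFuel t) i j nm rm rg t)
      (fun g'' hF'' => by
        have := walk rm rg t (pvFuel t) i (j + 1) g'' hi0 hit (by omega) (by omega)
          (fuel_enough t i j ht hi0 hj0)
        rwa [hF''] at this)
      hi0 hit hj0 hjt max_num (max_num + 1 - num).toNat num nm rfl rfl
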